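-- pv_equiv track=rewrite | github.com/DeeproChats/ResumeParserAI | app.py | recommend_skills
-- ===== SOURCE A (Python) =====
-- ds_keywords = ['tensorflow', 'keras', 'pytorch', 'machine learning', 'deep learning', 'flask', 'streamlit']
--
-- web_keywords = ['react', 'django', 'node js', 'react js', 'php', 'laravel', 'magento', 'wordpress', 'javascript', 'angular js', 'c#', 'flask']
--
-- android_keywords = ['android', 'android development', 'flutter', 'kotlin', 'xml', 'kivy']
--
-- ios_keywords = ['ios', 'ios development', 'swift', 'cocoa', 'cocoa touch', 'xcode']
--
-- uiux_keywords = ['ux', 'adobe xd', 'figma', 'zeplin', 'balsamiq', 'ui', 'prototyping', 'wireframes', 'storyframes', 'adobe photoshop', 'photoshop', 'editing', 'adobe illustrator', 'illustrator', 'adobe after effects', 'after effects', 'adobe premier pro', 'premier pro', 'adobe indesign', 'indesign', 'wireframe', 'solid', 'grasp', 'user research', 'user experience']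
--
-- def recommend_skills(skills):
--     recommendations = {
--         'Data Science': ds_keywords,
--         'Web Development': web_keywords,
--         'Android Development': android_keywords,
--         'IOS Development': ios_keywords,
--         'UI-UX Development': uiux_keywords
--     }
--
--     recommended_skills = []
--     field = ''
--
--     for skill in skills:
--         skill_lower = skill.lower()
--         for category, keywords in recommendations.items():
--             if skill_lower in keywords:
--                 field = category
--                 recommended_skills = keywords
--                 break
--         if recommended_skills:
--             break
--
--     return field, recommended_skills
-- ===== SOURCE B (Python) =====
-- ds_keywords = ['tensorflow', 'keras', 'pytorch', 'machine learning', 'deep learning', 'flask', 'streamlit']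
--
-- web_keywords = ['react', 'django', 'node js', 'react js', 'php', 'laravel', 'magento', 'wordpress', 'javascript', 'angular js', 'c#', 'flask']
--
-- android_keywords = ['android', 'android development', 'flutter', 'kotlin', 'xml', 'kivy']
--
-- ios_keywords = ['ios', 'ios development', 'swift', 'cocoa', 'cocoa touch', 'xcode']
--
-- uiux_keywords = ['ux', 'adobe xd', 'figma', 'zeplin', 'balsamiq', 'ui', 'prototyping', 'wireframes', 'storyframes', 'adobe photoshop', 'photoshop', 'editing', 'adobe illustrator', 'illustrator', 'adobe after effects', 'after effects', 'adobe premier pro', 'premier pro', 'adobe indesign', 'indesign', 'wireframe', 'solid', 'grasp', 'user research', 'user experience']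
--
--
-- def recommend_skills(skills):
--     categories = [
--         ('Data Science', ds_keywords),
--         ('Web Development', web_keywords),
--         ('Android Development', android_keywords),
--         ('IOS Development', ios_keywords),
--         ('UI-UX Development', uiux_keywords),
--     ]
--     # reverse index: keyword -> (category, keyword list); first category wins
--     index = {}
--     for cat, kws in categories:
--         for kw in kws:
--             if kw not in index:
--                 index[kw] = (cat, kws)
--     for skill in skills:
--         hit = index.get(skill.lower())
--         if hit is not None:
--             return hit
--     return '', []
-- ===== Notes on version B (the rewrite author's own statement) =====
-- stated objective: faster
-- what changed: Replaces the per-skill nested scan over five keyword lists with a break-flag state machine by a reverse index dict (keyword -> (category, keywords), first category wins) built once, then a single O(1) lookup per skill with an early return.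
import Mathlib
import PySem

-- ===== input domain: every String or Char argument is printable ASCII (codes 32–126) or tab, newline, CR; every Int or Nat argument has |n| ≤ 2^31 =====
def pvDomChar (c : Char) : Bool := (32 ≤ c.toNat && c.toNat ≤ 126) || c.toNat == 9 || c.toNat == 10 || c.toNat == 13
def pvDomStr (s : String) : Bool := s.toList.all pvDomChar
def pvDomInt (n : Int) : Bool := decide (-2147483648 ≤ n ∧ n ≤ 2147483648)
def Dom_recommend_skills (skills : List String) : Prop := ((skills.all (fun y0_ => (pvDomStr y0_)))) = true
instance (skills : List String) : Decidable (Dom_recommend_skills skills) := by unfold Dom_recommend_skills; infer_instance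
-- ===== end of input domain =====

-- B replaces A's per-skill nested scan over five keyword lists by a reverse index
-- (keyword -> (category, keywords), first category wins) built once, then one dict lookup per skill (faster).


-- ===== PORT A =====
def pv_ds_keywords : List String := ["tensorflow", "keras", "pytorch", "machine learning", "deep learning", "flask", "streamlit"]
def pv_web_keywords : List String := ["react", "django", "node js", "react js", "php", "laravel", "magento", "wordpress", "javascript", "angular js", "c#", "flask"]
def pv_android_keywords : List String := ["android", "android development", "flutter", "kotlin", "xml", "kivy"]
def pv_ios_keywords : List String := ["ios", "ios development", "swift", "cocoa", "cocoa touch", "xcode"]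
def pv_uiux_keywords : List String := ["ux", "adobe xd", "figma", "zeplin", "balsamiq", "ui", "prototyping", "wireframes", "storyframes", "adobe photoshop", "photoshop", "editing", "adobe illustrator", "illustrator", "adobe after effects", "after effects", "adobe premier pro", "premier pro", "adobe indesign", "indesign", "wireframe", "solid", "grasp", "user research", "user experience"]

-- recommendations.items(), in insertion order
def pv_recs : List (String × List String) :=
  [("Data Science", pv_ds_keywords),
   ("Web Development", pv_web_keywords),
   ("Android Development", pv_android_keywords),
   ("IOS Development", pv_ios_keywords),
   ("UI-UX Development", pv_uiux_keywords)]

-- A's inner loop: scan categories in order, break on the first whose list contains skill_lower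
def pvScanA (sl : String) (field : String) (recd : List String) : List (String × List String) → String × List String
  | [] => (field, recd)
  | (cat, kws) :: rest => if sl ∈ kws then (cat, kws) else pvScanA sl field recd rest

-- A's outer loop with 'if recommended_skills: break'
def pvLoopA : List String → String → List String → String × List String
  | [], field, recd => (field, recd)
  | s :: rest, field, recd =>
      let r := pvScanA (PySem.Str.lower s) field recd pv_recs
      if r.2.isEmpty then pvLoopA rest r.1 r.2 else r

def recommend_skills (skills : List String) : String × List String :=
  pvLoopA skills "" []

-- ===== PORT B =====
-- the reverse index: keyword -> (category, keyword list); only inserted if absent, so the first category wins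
def pvIndexB : PySem.Dict String (String × List String) :=
  pv_recs.foldl
    (fun d p => p.2.foldl (fun d kw => if d.contains kw then d else d.insert kw (p.1, p.2)) d)
    PySem.Dict.empty

set_option maxRecDepth 100000 in
def pvLoopB : List String → String × List String
  | [] => ("", [])
  | s :: rest =>
      match pvIndexB.get? (PySem.Str.lower s) with
      | some hit => hit
      | none => pvLoopB rest

set_option maxRecDepth 100000 in
def recommend_skills_alt (skills : List String) : String × List String :=
  pvLoopB skills

-- ===== PRECONDITION & SPEC =====
def Spec_recommend_skills (skills : List String) (out : String × List String) : Prop := out = recommend_skills_alt skills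
instance (skills : List String) (out : String × List String) : Decidable (Spec_recommend_skills skills out) := by unfold Spec_recommend_skills; infer_instance

-- ===== CLAIM (what is proved, stated in full; the proofs are below) =====
def Claim_equal_recommend_skills : Prop := ∀ (skills : List String), Dom_recommend_skills skills → Spec_recommend_skills skills (recommend_skills skills)

-- ===== LEMMAS AND PROOFS =====

-- A's inner scan is find? over the category list, with the incoming state as default
theorem pvScanA_eq_find? (sl field : String) (recd : List String) (l : List (String × List String)) :
    pvScanA sl field recd l = (l.find? (fun p => decide (sl ∈ p.2))).getD (field, recd) := by
  induction l with
  | nil => rfl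
  | cons p rest ih =>
    obtain ⟨c, k⟩ := p
    by_cases h : sl ∈ k <;> simp [pvScanA, List.find?, h, ih]

-- insert-if-absent over one keyword block: first-match lookup
theorem pv_get?_block (sl : String) (v : String × List String) (kws : List String)
    (d : PySem.Dict String (String × List String)) :
    (kws.foldl (fun d kw => if d.contains kw then d else d.insert kw v) d).get? sl
      = (d.get? sl).or (if sl ∈ kws then some v else none) := by
  induction kws generalizing d with
  | nil => simp
  | cons kw rest ih =>
    simp only [List.foldl_cons, ih]
    by_cases hc : d.contains kw
    · simp only [hc, if_true]
      by_cases he : sl = kw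
      · subst he
        have : (d.get? sl).isSome := by
          rw [← PySem.Dict.contains_eq_isSome_get?]; exact hc
        obtain ⟨w, hw⟩ := Option.isSome_iff_exists.mp this
        simp [hw, List.mem_cons]
      · simp [List.mem_cons, he]
    · simp only [hc]
      have hnone : d.get? kw = none := by
        rw [PySem.Dict.get?_eq_none_iff_contains]; simpa using hc
      by_cases he : sl = kw
      · subst he
        simp [PySem.Dict.get?_insert_self, hnone, List.mem_cons]
      · simp [PySem.Dict.get?_insert_of_ne _ _ he, List.mem_cons, he]

-- the whole index build: first-match lookup over all categories
theorem pv_get?_build (sl : String) (l : List (String × List String))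
    (d : PySem.Dict String (String × List String)) :
    (l.foldl (fun d p => p.2.foldl (fun d kw => if d.contains kw then d else d.insert kw (p.1, p.2)) d) d).get? sl
      = (d.get? sl).or (l.find? (fun p => decide (sl ∈ p.2))) := by
  induction l generalizing d with
  | nil => simp
  | cons p rest ih =>
    simp only [List.foldl_cons, ih, pv_get?_block, Option.or_assoc]
    by_cases h : sl ∈ p.2 <;> simp [List.find?, h]

set_option maxRecDepth 100000 in
theorem pvIndexB_get? (sl : String) :
    pvIndexB.get? sl = pv_recs.find? (fun p => decide (sl ∈ p.2)) := by
  simp [pvIndexB, pv_get?_build]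

-- every category's keyword list is nonempty, so a match always breaks A's outer loop
theorem pv_recs_nonempty : ∀ p ∈ pv_recs, p.2.isEmpty = false := by
  intro p hp
  simp only [pv_recs, List.mem_cons, List.not_mem_nil, or_false] at hp
  rcases hp with h | h | h | h | h <;> subst h <;> rfl

set_option maxRecDepth 100000 in
theorem pvLoopA_eq_pvLoopB (skills : List String) : pvLoopA skills "" [] = pvLoopB skills := by
  induction skills with
  | nil => rfl
  | cons s rest ih =>
    simp only [pvLoopA, pvLoopB, pvScanA_eq_find?, ← pvIndexB_get?]
    cases hfind : pvIndexB.get? (PySem.Str.lower s) with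
    | none => simpa using ih
    | some p =>
      have hp : p ∈ pv_recs :=
        List.mem_of_find?_eq_some (by rw [← pvIndexB_get?]; exact hfind)
      simp [pv_recs_nonempty p hp]

-- ===== VERDICT (by name: the statement is the Claim_ definition above) =====
set_option maxRecDepth 100000 in
theorem recommend_skills_spec : Claim_equal_recommend_skills := by
  intro skills _
  unfold Spec_recommend_skills recommend_skills recommend_skills_alt
  exact pvLoopA_eq_pvLoopB skills
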